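-- pv_equiv track=rewrite | github.com/6SuYou9/LeetCode | 编程基础 0 到 1/001-1768. 交替合并字符串.py | mergeAlternately1
-- ===== SOURCE A (Python) =====
-- def mergeAlternately1(word1:str, word2:str):
--     """
--     我的写法
--     结果：
--         执行用时分布：40ms左右
--         消耗内存分布：16.3MB左右
--     """
--     word3 = []
--     for i in range(max(len(word1), len(word2))):
--         if i > len(word1)-1:
--             word3.append("")
--         else:
--             word3.append(word1[i])
--         if i > len(word2)-1:
--             word3.append("")
--         else:
--             word3.append(word2[i])
--     return "".join(word3)
-- ===== SOURCE B (Python) =====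
-- def mergeAlternately1(word1: str, word2: str):
--     n = min(len(word1), len(word2))
--     parts = [a + b for a, b in zip(word1, word2)]
--     parts.append(word1[n:] + word2[n:])
--     return "".join(parts)
-- ===== Notes on version B (the rewrite author's own statement) =====
-- stated objective: idiomatic
-- what changed: Replaced the range(max(len1,len2)) loop with per-index bounds checks and '' placeholders by a zip-based interleave of the common prefix followed by appending the leftover tail slices word1[n:] + word2[n:].
import Mathlib
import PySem

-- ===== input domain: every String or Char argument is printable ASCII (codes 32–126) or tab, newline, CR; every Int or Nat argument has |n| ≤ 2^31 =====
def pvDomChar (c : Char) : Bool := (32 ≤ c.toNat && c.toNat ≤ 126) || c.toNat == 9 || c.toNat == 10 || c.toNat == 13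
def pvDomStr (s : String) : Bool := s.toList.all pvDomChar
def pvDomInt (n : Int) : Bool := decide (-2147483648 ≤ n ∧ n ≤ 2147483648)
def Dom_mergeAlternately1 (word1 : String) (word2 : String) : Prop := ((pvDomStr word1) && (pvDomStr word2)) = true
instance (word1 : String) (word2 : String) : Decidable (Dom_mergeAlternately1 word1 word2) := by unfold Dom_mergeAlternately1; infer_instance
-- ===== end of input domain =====

-- B replaces A's max-length loop with per-index bounds checks by a zip interleave of the
-- common prefix plus the leftover tail slices (idiomatic decomposition, same cost).


-- ===== PORT A =====
-- word3 is the Python list of strings (here: lists of chars; word1[i] is a 1-char string,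
-- "" is []).  The index i is always in range in the else-branches, so `.elim []` for the
-- impossible `none` of pyGet? is never taken.
def mergeAlternately1 (word1 : String) (word2 : String) : String :=
  let word3 : List (List Char) :=
    (PySem.List.pyRange 0 (max (PySem.Str.len word1) (PySem.Str.len word2)) 1).foldl
      (fun word3 i =>
        let word3 :=
          if i > PySem.Str.len word1 - 1 then word3 ++ [([] : List Char)]
          else word3 ++ [(PySem.Str.pyGet? word1 i).elim [] (fun c => [c])]
        if i > PySem.Str.len word2 - 1 then word3 ++ [([] : List Char)]
        else word3 ++ [(PySem.Str.pyGet? word2 i).elim [] (fun c => [c])]) []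
  String.ofList (PySem.Chars.join [] word3)

-- ===== PORT B =====
def mergeAlternately1_alt (word1 : String) (word2 : String) : String :=
  let n : Int := min (PySem.Str.len word1) (PySem.Str.len word2)
  let parts : List (List Char) :=
    (word1.toList.zip word2.toList).map (fun p => [p.1, p.2])
  let parts := parts ++ [(PySem.Str.slice word1 (some n) none).toList ++
                         (PySem.Str.slice word2 (some n) none).toList]
  String.ofList (PySem.Chars.join [] parts)

-- ===== PRECONDITION & SPEC =====
def Spec_mergeAlternately1 (word1 : String) (word2 : String) (out : String) : Prop := out = mergeAlternately1_alt word1 word2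
instance (word1 : String) (word2 : String) (out : String) : Decidable (Spec_mergeAlternately1 word1 word2 out) := by unfold Spec_mergeAlternately1; infer_instance

-- ===== CLAIM (what is proved, stated in full; the proofs are below) =====
def Claim_equal_mergeAlternately1 : Prop := ∀ (word1 : String) (word2 : String), Dom_mergeAlternately1 word1 word2 → Spec_mergeAlternately1 word1 word2 (mergeAlternately1 word1 word2)

-- ===== LEMMAS AND PROOFS =====

-- the element word3 receives at index i : a 1-char chunk, or [] past the end
def pvE (l : List Char) (i : Nat) : List Char := (l[i]?).elim [] (fun c => [c])

theorem pvE_nil (i : Nat) : pvE [] i = [] := by simp [pvE]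

theorem pvE_succ (x : Char) (l : List Char) (i : Nat) : pvE (x :: l) (i + 1) = pvE l i := by
  simp [pvE]

theorem pv_aux_intersperse (xss : List (List Char)) :
    (List.intersperse ([] : List Char) xss).flatten = xss.flatten := by
  induction xss with
  | nil => rfl
  | cons x xs ih =>
    cases xs with
    | nil => rfl
    | cons y ys => simp only [List.intersperse] at *; simp [ih]

theorem pv_join_empty (xss : List (List Char)) : PySem.Chars.join [] xss = xss.flatten := by
  simp only [PySem.Chars.join, List.intercalate]
  exact pv_aux_intersperse xss

theorem pv_flatten_flatMap (l : List Nat) (g : Nat → List (List Char)) :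
    (l.flatMap g).flatten = l.flatMap (fun k => (g k).flatten) := by
  induction l with
  | nil => rfl
  | cons x xs ih => simp [List.flatMap_cons, ih]

theorem pv_selfE (l : List Char) :
    (List.range l.length).flatMap (fun i => pvE l i) = l := by
  induction l with
  | nil => simp
  | cons x xs ih =>
    rw [List.length_cons, List.range_succ_eq_map, List.flatMap_cons, List.flatMap_map]
    simp only [pvE_succ]
    rw [ih]
    simp [pvE]

-- A's flattened loop output equals B's zip-interleave plus tails
theorem pv_interleave (a b : List Char) :
    (List.range (max a.length b.length)).flatMap (fun i => pvE a i ++ pvE b i)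
      = (a.zip b).flatMap (fun p => [p.1, p.2])
        ++ (a.drop (min a.length b.length) ++ b.drop (min a.length b.length)) := by
  induction a generalizing b with
  | nil =>
    simp only [List.length_nil, Nat.zero_max, Nat.zero_min, List.zip_nil_left,
      List.flatMap_nil, List.drop_zero, List.drop_nil, List.nil_append, pvE_nil]
    exact pv_selfE b
  | cons x xs ih =>
    cases b with
    | nil =>
      simp only [List.length_nil, Nat.max_zero, Nat.min_zero, List.zip_nil_right,
        List.flatMap_nil, List.drop_zero, List.drop_nil, List.append_nil, pvE_nil,
        List.nil_append]
      exact pv_selfE (x :: xs)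
    | cons y ys =>
      rw [List.length_cons, List.length_cons, Nat.succ_max_succ, Nat.succ_min_succ,
        List.range_succ_eq_map, List.flatMap_cons, List.flatMap_map]
      simp only [pvE_succ]
      rw [ih ys]
      simp [pvE]

-- one iteration of A's loop body, on the Nat index k the range supplies
theorem pv_bodyAB (word1 word2 : String) (w3 : List (List Char)) (k : Nat) :
    (if 0 + (k : Int) > (word2.toList.length : Int) - 1 then
        (if 0 + (k : Int) > (word1.toList.length : Int) - 1 then w3 ++ [([] : List Char)]
         else w3 ++ [(PySem.Str.pyGet? word1 (0 + (k : Int))).elim [] fun c => [c]]) ++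
          [([] : List Char)]
      else
        (if 0 + (k : Int) > (word1.toList.length : Int) - 1 then w3 ++ [([] : List Char)]
         else w3 ++ [(PySem.Str.pyGet? word1 (0 + (k : Int))).elim [] fun c => [c]]) ++
          [(PySem.Str.pyGet? word2 (0 + (k : Int))).elim [] fun c => [c]])
      = w3 ++ [pvE word1.toList k, pvE word2.toList k] := by
  simp only [zero_add, PySem.Str.pyGet?_natCast]
  by_cases h1 : k < word1.toList.length <;> by_cases h2 : k < word2.toList.length
  · rw [if_neg (by omega), if_neg (by omega)]
    simp [pvE, List.getElem?_eq_getElem h1, List.getElem?_eq_getElem h2]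
  · rw [if_pos (by omega), if_neg (by omega)]
    simp [pvE, List.getElem?_eq_getElem h1,
      List.getElem?_eq_none (show word2.toList.length ≤ k by omega)]
  · rw [if_neg (by omega), if_pos (by omega)]
    simp [pvE, List.getElem?_eq_getElem h2,
      List.getElem?_eq_none (show word1.toList.length ≤ k by omega)]
  · rw [if_pos (by omega), if_pos (by omega)]
    simp [pvE, List.getElem?_eq_none (show word1.toList.length ≤ k by omega),
      List.getElem?_eq_none (show word2.toList.length ≤ k by omega)]

theorem mergeAlternately1_spec : Claim_equal_mergeAlternately1 := by
  intro word1 word2 _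
  unfold Spec_mergeAlternately1 mergeAlternately1 mergeAlternately1_alt
  simp only [PySem.List.pyRange_one, PySem.Str.len_eq, PySem.Str.toList_slice]
  rw [← Nat.cast_max, sub_zero, Int.toNat_natCast, List.foldl_map]
  refine Eq.trans (congrArg (fun t => String.ofList (PySem.Chars.join [] t))
    (List.foldl_ext _
      (fun (w3 : List (List Char)) (k : Nat) =>
        w3 ++ (fun k => [pvE word1.toList k, pvE word2.toList k]) k) []
      (fun acc k _ => pv_bodyAB word1 word2 acc k))) ?_
  rw [PySem.List.foldl_append_eq_flatMap, List.nil_append, pv_join_empty]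
  beta_reduce
  rw [pv_join_empty, pv_flatten_flatMap]
  simp only [List.flatten_cons, List.flatten_nil, List.append_nil]
  rw [pv_interleave, ← Nat.cast_min]
  rw [show PySem.Chars.slice word1.toList (some ((min word1.toList.length word2.toList.length : Nat) : Int)) none
        = word1.toList.drop (min word1.toList.length word2.toList.length) from
      PySem.List.slice_from_natCast _ _]
  rw [show PySem.Chars.slice word2.toList (some ((min word1.toList.length word2.toList.length : Nat) : Int)) none
        = word2.toList.drop (min word1.toList.length word2.toList.length) from
      PySem.List.slice_from_natCast _ _]
  rw [List.flatten_append]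
  rw [← List.flatMap_def]
  rw [List.flatten_cons]
  rw [List.flatten_nil]
  rw [List.append_nil]
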